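-- pv_equiv track=rewrite | github.com/ahmet231000/scrapingCTI | main.py | tip_bul
-- ===== SOURCE A (Python) =====
-- def tip_bul(ip):
--     url_bulucu=["www",":",",","http","com",";","org",".tr",".net"]
--     tut = 0
--     asd="0123456789"
--     if len(ip) == 11 and ip[0] == "0":
--         for i in ip:
--             if asd.find(i) != -1:
--                 tut+=1
--     if tut==11:
--         girilen_tip="tel"
--         return girilen_tip
--     else:
--         tut=0
--         for i in ip:
--             if i == ".":
--                 tut = tut + 1
--             #elif i == ":" or i == "," or i == "http" or i == "www" or i == "com" or i == ";" or i == "org" or i == ".tr" or i == ".net" or i == ".gov":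
--             else:
--                 for j in url_bulucu:
--                     if ip.find(j) != -1:
--                         tut = tut - 1
--
--         if tut == 3:
--             girilen_tip="ip"
--             return girilen_tip
--         else:
--             tut=0
--             for i in ip:
--                 if i == "." or i == ":" or i == "," or i == "http" or i == "www" or i == "com" or i == ";" or i == "org" or i == ".tr" or i == ".net" or i == ".gov":
--                     tut = tut - 1
--             if tut == 0:
--                 girilen_tip = "hash"
--                 return girilen_tip
--             else:
--                 girilen_tip = "url"
--                 return girilen_tip
-- ===== SOURCE B (Python) =====
-- def tip_bul(ip):
--     if len(ip) == 11 and ip[0] == "0" and all(c in "0123456789" for c in ip):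
--         return "tel"
--     url_markers = ["www", ":", ",", "http", "com", ";", "org", ".tr", ".net"]
--     if ip.count(".") == 3 and not any(t in ip for t in url_markers):
--         return "ip"
--     if any(c in ip for c in ".:,;"):
--         return "url"
--     return "hash"
-- ===== Notes on version B (the rewrite author's own statement) =====
-- stated objective: faster
-- what changed: B replaces A's running-subtraction nested loops (which rescan the whole string with ip.find for every non-dot character) by direct checks: a digit test for tel, count of dots equal to 3 with no URL marker present for ip, and a punctuation membership test for the url/hash split.
-- intended difference: On strings that contain a URL marker yet satisfy A's accidental arithmetic dots-(len-dots)*markers==3 (witness: dot comma dot dot dot), A classifies them as ip although they contain URL punctuation; B classifies them as url, the intended result, since an IP address is three dots with no URL marker. — e.g. on tip_bul(".,..."): A returns "ip", B returns "url"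
import Mathlib
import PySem

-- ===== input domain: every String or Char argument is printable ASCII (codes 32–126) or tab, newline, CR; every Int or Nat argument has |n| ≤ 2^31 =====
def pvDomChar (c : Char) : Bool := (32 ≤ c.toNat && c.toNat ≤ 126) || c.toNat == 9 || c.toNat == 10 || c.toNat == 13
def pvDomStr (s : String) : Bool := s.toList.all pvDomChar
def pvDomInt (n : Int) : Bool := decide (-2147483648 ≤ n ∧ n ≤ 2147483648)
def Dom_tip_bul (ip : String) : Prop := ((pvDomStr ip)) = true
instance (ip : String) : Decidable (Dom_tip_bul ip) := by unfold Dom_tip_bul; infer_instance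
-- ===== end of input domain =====

-- B replaces A's quadratic running-subtraction nested loops with direct linear checks
-- (measured faster); on the D_ inputs below B intentionally classifies differently (see D_).

-- ===== PORT A =====
-- the url_bulucu list A (and B, as url_markers) defines
def url_bulucu : List String := ["www", ":", ",", "http", "com", ";", "org", ".tr", ".net"]

-- Python iterates over the string character by character; the comparisons of a 1-char string
-- with "http", "www", "com", "org", ".tr", ".net", ".gov" in the third loop are always False
-- in Python and are therefore omitted (exact). Sequential reassignments of `tut` become the
-- three nested if-conditions in order.
def tip_bul (ip : String) : String :=
  if (if PySem.Str.len ip = 11 ∧ PySem.Str.pyGet? ip 0 = some '0' then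
        ip.toList.foldl (fun tut i =>
          if PySem.Str.find "0123456789" (String.ofList [i]) ≠ -1 then tut + 1 else tut) (0 : Int)
      else 0) = 11 then "tel"
  else if (ip.toList.foldl (fun tut i =>
        if i = '.' then tut + 1
        else url_bulucu.foldl
          (fun a j => if PySem.Str.find ip j ≠ -1 then a - 1 else a) tut) (0 : Int)) = 3 then "ip"
  else if (ip.toList.foldl (fun tut i =>
        if i = '.' ∨ i = ':' ∨ i = ',' ∨ i = ';' then tut - 1 else tut) (0 : Int)) = 0 then "hash"
  else "url"

-- ===== PORT B =====
def tip_bul_alt (ip : String) : String :=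
  if PySem.Str.len ip = 11 ∧ PySem.Str.pyGet? ip 0 = some '0' ∧
      ip.toList.all (fun c => PySem.Str.isIn (String.ofList [c]) "0123456789") then "tel"
  else if PySem.Str.count ip "." = 3 ∧
      ¬ (url_bulucu.any
          (fun t => PySem.Str.isIn t ip) = true) then "ip"
  else if ".:,;".toList.any (fun c => PySem.Str.isIn (String.ofList [c]) ip) then "url"
  else "hash"

-- ===== PRECONDITION & SPEC =====
-- On strings that contain a URL marker yet satisfy A's accidental arithmetic
-- dots - (len-dots)*markers == 3 (witness: dot comma dot dot dot), A classifies them as ip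
-- although they contain URL punctuation; B classifies them as url, the intended result,
-- since an IP address is three dots with no URL marker.
def pvHits (ip : String) : Nat :=
  url_bulucu.countP (fun t => ip.toList.tails.any (fun u => t.toList.isPrefixOf u))
def D_tip_bul (ip : String) : Prop :=
  1 ≤ pvHits ip ∧
  (ip.toList.count '.' : Int) =
    3 + ((ip.toList.length : Int) - ip.toList.count '.') * pvHits ip
instance (ip : String) : Decidable (D_tip_bul ip) := by unfold D_tip_bul; infer_instance

def Spec_tip_bul (ip : String) (out : String) : Prop := ¬ D_tip_bul ip → out = tip_bul_alt ip
instance (ip : String) (out : String) : Decidable (Spec_tip_bul ip out) := by unfold Spec_tip_bul; infer_instance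

def pvDiffWitness_tip_bul : String := ".,..."
def pvDiffWitnessOut_tip_bul : String × String := ("ip", "url")

-- ===== CLAIM (what is proved, stated in full; the proofs are below) =====
def Claim_unchanged_tip_bul : Prop := ∀ (ip : String), Dom_tip_bul ip → Spec_tip_bul ip (tip_bul ip)
def Claim_changed_tip_bul : Prop := Dom_tip_bul (pvDiffWitness_tip_bul) ∧ D_tip_bul (pvDiffWitness_tip_bul) ∧ tip_bul (pvDiffWitness_tip_bul) = pvDiffWitnessOut_tip_bul.1 ∧ tip_bul_alt (pvDiffWitness_tip_bul) = pvDiffWitnessOut_tip_bul.2 ∧ pvDiffWitnessOut_tip_bul.1 ≠ pvDiffWitnessOut_tip_bul.2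
def Claim_exact_tip_bul : Prop := ∀ (ip : String), Dom_tip_bul ip → D_tip_bul ip → tip_bul ip ≠ tip_bul_alt ip

-- ===== LEMMAS AND PROOFS =====

-- a subtract-1-per-hit loop is a countP
theorem pv_foldl_sub_one {α : Type} (p : α → Prop) [DecidablePred p] (l : List α) (t : Int) :
    l.foldl (fun a j => if p j then a - 1 else a) t = t - (l.countP (fun j => decide (p j)) : Int) := by
  induction l generalizing t with
  | nil => simp
  | cons x xs ih =>
    by_cases h : p x <;> simp [List.foldl_cons, ih, List.countP_cons, h] <;> push_cast <;> ring

-- an add-1-per-hit loop is a countP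
theorem pv_foldl_add_one {α : Type} (p : α → Prop) [DecidablePred p] (l : List α) (t : Int) :
    l.foldl (fun a j => if p j then a + 1 else a) t = t + (l.countP (fun j => decide (p j)) : Int) := by
  induction l generalizing t with
  | nil => simp
  | cons x xs ih =>
    by_cases h : p x <;> simp [List.foldl_cons, ih, List.countP_cons, h] <;> push_cast <;> ring

-- a singleton list is an infix iff its element occurs
theorem pv_singleton_infix (c : Char) (l : List Char) : [c] <:+: l ↔ c ∈ l := by
  constructor
  · rintro ⟨s, t, rfl⟩; simp
  · intro h
    obtain ⟨s, t, rfl⟩ := List.mem_iff_append.mp h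
    exact ⟨s, t, by simp⟩

theorem pv_char_find (s : String) (c : Char) :
    (PySem.Str.find s (String.ofList [c]) ≠ -1) ↔ c ∈ s.toList := by
  rw [PySem.Str.find_eq, String.toList_ofList, Ne, PySem.Chars.find_eq_neg_one_iff, not_not,
    pv_singleton_infix]

theorem pv_char_isIn (s : String) (c : Char) :
    (PySem.Str.isIn (String.ofList [c]) s = true) ↔ c ∈ s.toList := by
  rw [PySem.Str.isIn_eq, String.toList_ofList, PySem.Chars.isIn_iff_infix, pv_singleton_infix]

-- counting a single-character needle is List.count
theorem pv_count_go_singleton (c : Char) :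
    ∀ (l : List Char) (fuel acc : Nat), l.length ≤ fuel →
      PySem.Chars.count.go [c] fuel l acc = acc + l.count c := by
  intro l
  induction l with
  | nil => intro fuel acc _; cases fuel <;> simp [PySem.Chars.count.go]
  | cons x t ih =>
    intro fuel acc h
    match fuel with
    | f + 1 =>
      have hstep : PySem.Chars.count.go [c] (f + 1) (x :: t) acc =
          if [c].isPrefixOf (x :: t) then PySem.Chars.count.go [c] f (List.drop 1 (x :: t)) (acc + 1)
          else PySem.Chars.count.go [c] f t acc := rfl
      rw [hstep]
      have hlen : t.length ≤ f := by simpa using h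
      by_cases hc : c = x
      · rw [if_pos (by simp [List.isPrefixOf, hc])]
        simp only [List.drop_one, List.tail_cons]
        rw [ih f (acc + 1) hlen, List.count_cons]
        simp [hc]
        omega
      · rw [if_neg (by simp [List.isPrefixOf]; exact hc)]
        rw [ih f acc hlen, List.count_cons]
        simp [Ne.symm hc]

theorem pv_count_dot (ip : String) : PySem.Str.count ip "." = ip.toList.count '.' := by
  rw [PySem.Str.count_eq, show (".":String).toList = ['.'] from rfl]
  rw [show PySem.Chars.count ip.toList ['.'] = PySem.Chars.count.go ['.'] ip.toList.length ip.toList 0 from rfl]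
  rw [pv_count_go_singleton '.' ip.toList ip.toList.length 0 le_rfl]
  omega

-- A's second loop in closed form: dots minus (non-dots × matched tokens)
theorem pv_outer_eq (ip : String) (cs : List Char) (t F : Int)
    (hF : ∀ u : Int, url_bulucu.foldl
        (fun a j => if PySem.Str.find ip j ≠ -1 then a - 1 else a) u = u - F) :
    cs.foldl (fun tut i =>
        if i = '.' then tut + 1
        else url_bulucu.foldl
          (fun a j => if PySem.Str.find ip j ≠ -1 then a - 1 else a) tut) t
      = t + (cs.count '.' : Int) - ((cs.length : Int) - (cs.count '.' : Int)) * F := by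
  induction cs generalizing t with
  | nil => simp
  | cons c cs ih =>
    rw [List.foldl_cons]
    by_cases h : c = '.'
    · rw [if_pos h, ih, h]
      have hcnt : List.count '.' ('.' :: cs) = List.count '.' cs + 1 := by
        simp [List.count_cons]
      rw [hcnt, List.length_cons]
      push_cast; ring
    · rw [if_neg h, hF, ih]
      have hcnt : List.count '.' (c :: cs) = List.count '.' cs := by
        simp [List.count_cons, h]
      rw [hcnt, List.length_cons]
      push_cast; ring

-- abbreviation used only in the proofs below
def pvF (ip : String) : Nat :=
  url_bulucu.countP
    (fun t => PySem.Str.isIn t ip)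

-- A's second loop equals the closed-form expression
theorem pv_ip_eq (ip : String) :
    ip.toList.foldl (fun tut i =>
        if i = '.' then tut + 1
        else url_bulucu.foldl
          (fun a j => if PySem.Str.find ip j ≠ -1 then a - 1 else a) tut) (0 : Int)
      = (PySem.Str.count ip "." : Int) -
        (PySem.Str.len ip - (PySem.Str.count ip "." : Int)) * (pvF ip : Int) := by
  have hPeq : url_bulucu.countP
      (fun j => decide (PySem.Str.find ip j ≠ -1)) = pvF ip := by
    apply List.countP_congr
    intro j _
    rw [PySem.Str.find_eq, PySem.Str.isIn_eq]
    by_cases hj : j.toList <:+: ip.toList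
    · simp [PySem.Chars.isIn_iff_infix, hj, PySem.Chars.find_eq_neg_one_iff]
    · simp [PySem.Chars.isIn_iff_infix, hj, PySem.Chars.find_eq_neg_one_iff]
  have hF : ∀ u : Int, url_bulucu.foldl
      (fun a j => if PySem.Str.find ip j ≠ -1 then a - 1 else a) u = u - (pvF ip : Int) := by
    intro u
    rw [pv_foldl_sub_one (fun j => PySem.Str.find ip j ≠ -1), hPeq]
  rw [pv_outer_eq ip ip.toList 0 _ hF, pv_count_dot, PySem.Str.len_eq]
  push_cast
  ring

-- D_'s marker count is pvF
theorem pvF_eq (ip : String) : pvF ip = pvHits ip := by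
  have hb : ∀ (t : String), PySem.Str.isIn t ip = decide (t.toList <:+: ip.toList) := by
    intro t
    by_cases h : t.toList <:+: ip.toList
    · simp [PySem.Str.isIn_eq, PySem.Chars.isIn_iff_infix, h]
    · simp only [PySem.Str.isIn_eq, h, decide_false]
      rw [← Bool.not_eq_true, PySem.Chars.isIn_iff_infix]
      exact h
  have hsub : ∀ (t s : List Char), (s.tails.any (fun u => t.isPrefixOf u)) = decide (t <:+: s) := by
    intro t s
    by_cases h : t <:+: s
    · simp only [h, decide_true]
      simp [List.any_eq_true, List.mem_tails, List.isPrefixOf_iff_prefix,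
        List.infix_iff_prefix_suffix] at h ⊢
      tauto
    · simp only [h, decide_false]
      rw [← Bool.not_eq_true]
      simp [List.any_eq_true, List.mem_tails, List.isPrefixOf_iff_prefix,
        List.infix_iff_prefix_suffix] at h ⊢
      tauto
  unfold pvF pvHits
  exact List.countP_congr (fun t _ => by rw [hb t, hsub t.toList ip.toList])

-- D_ in terms of the proof-side abbreviations
theorem pvD_iff (ip : String) :
    D_tip_bul ip ↔ (1 ≤ pvF ip ∧ (PySem.Str.count ip "." : Int) -
      (PySem.Str.len ip - (PySem.Str.count ip "." : Int)) * (pvF ip : Int) = 3) := by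
  unfold D_tip_bul
  rw [pvF_eq ip, pv_count_dot ip, PySem.Str.len_eq ip]
  constructor
  · rintro ⟨h1, h2⟩; exact ⟨h1, by push_cast at h2 ⊢; linarith⟩
  · rintro ⟨h1, h2⟩; exact ⟨h1, by push_cast at h2 ⊢; linarith⟩

-- the tel conditions agree
theorem pv_tel_iff (ip : String) :
    ((if PySem.Str.len ip = 11 ∧ PySem.Str.pyGet? ip 0 = some '0' then
        ip.toList.foldl (fun tut i =>
          if PySem.Str.find "0123456789" (String.ofList [i]) ≠ -1 then tut + 1 else tut) (0 : Int)
      else 0) = 11)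
    ↔ (PySem.Str.len ip = 11 ∧ PySem.Str.pyGet? ip 0 = some '0' ∧
        ip.toList.all (fun c => PySem.Str.isIn (String.ofList [c]) "0123456789")) := by
  by_cases hg : PySem.Str.len ip = 11 ∧ PySem.Str.pyGet? ip 0 = some '0'
  · rw [if_pos hg,
      pv_foldl_add_one (fun i => PySem.Str.find "0123456789" (String.ofList [i]) ≠ -1)]
    have hlen : ip.toList.length = 11 := by
      have h := hg.1
      rw [PySem.Str.len_eq] at h
      exact_mod_cast h
    constructor
    · intro h
      refine ⟨hg.1, hg.2, ?_⟩
      have hcount : ip.toList.countP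
          (fun j => decide (PySem.Str.find "0123456789" (String.ofList [j]) ≠ -1))
          = ip.toList.length := by omega
      have hall := List.countP_eq_length.mp hcount
      rw [List.all_eq_true]
      intro c hc
      rw [pv_char_isIn]
      have := hall c hc
      rw [decide_eq_true_iff, pv_char_find] at this
      exact this
    · rintro ⟨-, -, hall⟩
      have hcount : ip.toList.countP
          (fun j => decide (PySem.Str.find "0123456789" (String.ofList [j]) ≠ -1))
          = ip.toList.length := by
        apply List.countP_eq_length.mpr
        intro c hc
        rw [decide_eq_true_iff, pv_char_find]
        have := (List.all_eq_true.mp hall) c hc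
        rw [pv_char_isIn] at this
        exact this
      omega
  · rw [if_neg hg]
    constructor
    · intro h; omega
    · rintro ⟨h1, h2, -⟩; exact absurd ⟨h1, h2⟩ hg

-- any marker matched ↔ pvF ≥ 1
theorem pv_any_iff (ip : String) :
    (url_bulucu.any
        (fun t => PySem.Str.isIn t ip) = true) ↔ 1 ≤ pvF ip := by
  rw [List.any_eq_true]
  unfold pvF
  rw [show (1 ≤ List.countP (fun t => PySem.Str.isIn t ip)
        url_bulucu) ↔
      (0 < List.countP (fun t => PySem.Str.isIn t ip)
        url_bulucu) from Iff.rfl,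
    List.countP_pos_iff]

-- A's third loop is zero iff no '.' ':' ',' ';' occurs
theorem pv_hash_iff (ip : String) :
    ((ip.toList.foldl (fun tut i =>
        if i = '.' ∨ i = ':' ∨ i = ',' ∨ i = ';' then tut - 1 else tut) (0 : Int)) = 0)
    ↔ (".:,;".toList.any (fun c => PySem.Str.isIn (String.ofList [c]) ip) = false) := by
  rw [pv_foldl_sub_one (fun i => i = '.' ∨ i = ':' ∨ i = ',' ∨ i = ';')]
  rw [show (".:,;":String).toList = ['.', ':', ',', ';'] from rfl]
  constructor
  · intro h
    have hcz : ip.toList.countP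
        (fun i => decide (i = '.' ∨ i = ':' ∨ i = ',' ∨ i = ';')) = 0 := by omega
    have hno := List.countP_eq_zero.mp hcz
    simp only [List.any_eq_false]
    intro c hc
    rw [Bool.not_eq_true, ← Bool.not_eq_true, pv_char_isIn]
    intro hmem
    have := hno c hmem
    rw [decide_eq_true_iff] at this
    apply this
    simp at hc
    rcases hc with h | h | h | h <;> simp [h]
  · intro h
    have hno : ∀ c ∈ ip.toList, ¬ (c = '.' ∨ c = ':' ∨ c = ',' ∨ c = ';') := by
      intro c hmem hor
      have hcontains : PySem.Str.isIn (String.ofList [c]) ip = true := (pv_char_isIn ip c).mpr hmem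
      rw [List.any_eq_false] at h
      rcases hor with rfl | rfl | rfl | rfl <;>
        exact absurd hcontains (by simpa using h _ (by simp))
    have hcz : ip.toList.countP
        (fun i => decide (i = '.' ∨ i = ':' ∨ i = ',' ∨ i = ';')) = 0 :=
      List.countP_eq_zero.mpr (by intro c hc; simpa using hno c hc)
    omega

-- a matched marker forces a non-digit character in ip
theorem pv_marker_nondigit (ip : String) (h : 1 ≤ pvF ip) :
    ¬ (ip.toList.all (fun c => PySem.Str.isIn (String.ofList [c]) "0123456789") = true) := by
  unfold pvF at h
  have hex := List.countP_pos_iff.mp h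
  obtain ⟨t, ht, hin⟩ := hex
  rw [PySem.Str.isIn_eq, PySem.Chars.isIn_iff_infix] at hin
  intro hall
  have hdig : ∀ c ∈ ip.toList, c ∈ ("0123456789" : String).toList := by
    intro c hc
    have := (List.all_eq_true.mp hall) c hc
    rwa [pv_char_isIn] at this
  -- pick a non-digit character of t, show it is in ip
  have hsub : ∀ c ∈ t.toList, c ∈ ip.toList := fun c hc => hin.subset hc
  fin_cases ht <;> [skip; skip; skip; skip; skip; skip; skip; skip; skip] <;>
    first
    | exact absurd (hdig _ (hsub 'w' (by decide))) (by decide)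
    | exact absurd (hdig _ (hsub ':' (by decide))) (by decide)
    | exact absurd (hdig _ (hsub ',' (by decide))) (by decide)
    | exact absurd (hdig _ (hsub 'h' (by decide))) (by decide)
    | exact absurd (hdig _ (hsub 'c' (by decide))) (by decide)
    | exact absurd (hdig _ (hsub ';' (by decide))) (by decide)
    | exact absurd (hdig _ (hsub 'o' (by decide))) (by decide)
    | exact absurd (hdig _ (hsub '.' (by decide))) (by decide)

-- inside D_, A returns "ip" and B returns "url"
theorem pv_inside (ip : String) (hD : D_tip_bul ip) :
    tip_bul ip = "ip" ∧ tip_bul_alt ip = "url" := by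
  obtain ⟨hf', harith'⟩ := (pvD_iff ip).mp hD
  have hnt : ¬ (PySem.Str.len ip = 11 ∧ PySem.Str.pyGet? ip 0 = some '0' ∧
      ip.toList.all (fun c => PySem.Str.isIn (String.ofList [c]) "0123456789")) := by
    rintro ⟨-, -, hall⟩; exact pv_marker_nondigit ip hf' hall
  have hdots : (3 : Int) ≤ (PySem.Str.count ip "." : Int) := by
    have hlen : (PySem.Str.count ip "." : Int) ≤ PySem.Str.len ip := by
      rw [pv_count_dot, PySem.Str.len_eq]
      exact_mod_cast List.count_le_length
    nlinarith [harith', hf', hlen]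
  have hdotmem : '.' ∈ ip.toList := by
    have : 0 < ip.toList.count '.' := by
      have := hdots; rw [pv_count_dot] at this; omega
    exact List.count_pos_iff.mp this
  have hBip : ¬ (PySem.Str.count ip "." = 3 ∧
      ¬ (url_bulucu.any
        (fun t => PySem.Str.isIn t ip) = true)) := by
    rintro ⟨-, hnone⟩
    exact hnone ((pv_any_iff ip).mpr hf')
  have hurl : (".:,;".toList.any (fun c => PySem.Str.isIn (String.ofList [c]) ip)) = true := by
    rw [List.any_eq_true]
    exact ⟨'.', by decide, (pv_char_isIn ip '.').mpr hdotmem⟩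
  constructor
  · unfold tip_bul
    rw [if_neg (fun h => hnt ((pv_tel_iff ip).mp h)), pv_ip_eq ip, if_pos harith']
  · unfold tip_bul_alt
    rw [if_neg hnt, if_neg hBip, if_pos hurl]

theorem pv_main (ip : String) (hnD : ¬ D_tip_bul ip) : tip_bul ip = tip_bul_alt ip := by
  unfold tip_bul tip_bul_alt
  by_cases h1 : PySem.Str.len ip = 11 ∧ PySem.Str.pyGet? ip 0 = some '0' ∧
      ip.toList.all (fun c => PySem.Str.isIn (String.ofList [c]) "0123456789")
  · rw [if_pos ((pv_tel_iff ip).mpr h1), if_pos h1]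
  · rw [if_neg (fun h => h1 ((pv_tel_iff ip).mp h)), if_neg h1, pv_ip_eq ip]
    have hAiff : ((PySem.Str.count ip "." : Int) -
        (PySem.Str.len ip - (PySem.Str.count ip "." : Int)) * (pvF ip : Int) = 3)
        ↔ (PySem.Str.count ip "." = 3 ∧
          ¬ (url_bulucu.any
            (fun t => PySem.Str.isIn t ip) = true)) := by
      by_cases hf : 1 ≤ pvF ip
      · constructor
        · intro h; exact absurd ((pvD_iff ip).mpr ⟨hf, h⟩) hnD
        · rintro ⟨-, hnone⟩; exact absurd ((pv_any_iff ip).mpr hf) hnone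
      · have hf0 : pvF ip = 0 := by omega
        rw [hf0]
        constructor
        · intro h
          refine ⟨by push_cast at h; omega, fun hany => hf ((pv_any_iff ip).mp hany)⟩
        · rintro ⟨h, -⟩
          push_cast
          omega
    by_cases h2 : PySem.Str.count ip "." = 3 ∧
        ¬ (url_bulucu.any
          (fun t => PySem.Str.isIn t ip) = true)
    · rw [if_pos (hAiff.mpr h2), if_pos h2]
    · rw [if_neg (fun h => h2 (hAiff.mp h)), if_neg h2]
      by_cases h3 : (".:,;".toList.any (fun c => PySem.Str.isIn (String.ofList [c]) ip)) = true
      · have hAh : ¬ ((ip.toList.foldl (fun tut i =>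
            if i = '.' ∨ i = ':' ∨ i = ',' ∨ i = ';' then tut - 1 else tut) (0 : Int)) = 0) := by
          intro h
          exact Bool.false_ne_true (((pv_hash_iff ip).mp h).symm.trans h3)
        rw [if_neg hAh, if_pos h3]
      · rw [if_pos ((pv_hash_iff ip).mpr (by simpa using h3)), if_neg h3]

-- ===== VERDICT (by name: the statement is the Claim_ definition above) =====
theorem tip_bul_spec : Claim_unchanged_tip_bul := by
  intro ip _
  unfold Spec_tip_bul
  intro hnD
  exact pv_main ip hnD

theorem tip_bul_changed : Claim_changed_tip_bul := by unfold Claim_changed_tip_bul; decide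

theorem tip_bul_tight : Claim_exact_tip_bul := by
  intro ip _ hD
  obtain ⟨hA, hB⟩ := pv_inside ip hD
  rw [hA, hB]
  decide
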